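-- pv_equiv track=rewrite | github.com/ton86/worklog | source.py | group_posts
-- ===== SOURCE A (Python) =====
-- def group_posts(lines):
--     """
--     Return list of posts and within each post a list of its lines.
--     """
--     posts = []
--     post = []
--     lines.append('### ')
--     for line in lines:
--         if line.startswith('### '):
--             posts.append(post)
--             post = [line]
--         else:
--             post.append(line)
--     return posts
-- ===== SOURCE B (Python) =====
-- def group_posts(lines):
--     """
--     Return list of posts and within each post a list of its lines.
--     """
--     lines.append('### ')
--     idx = [i for i, line in enumerate(lines) if line.startswith('### ')]
--     bounds = [0] + idx
--     return [lines[bounds[j]:bounds[j + 1]] for j in range(len(idx))]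
-- ===== Notes on version B (the rewrite author's own statement) =====
-- stated objective: alternative
-- what changed: Replaces the stateful accumulator loop (current-post buffer flushed at each marker) with an index-based construction: collect the positions of all '### ' marker lines once and emit the posts as slices between consecutive boundaries, with the same sentinel append preserving the final flush and the in-place mutation of lines.
import Mathlib
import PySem

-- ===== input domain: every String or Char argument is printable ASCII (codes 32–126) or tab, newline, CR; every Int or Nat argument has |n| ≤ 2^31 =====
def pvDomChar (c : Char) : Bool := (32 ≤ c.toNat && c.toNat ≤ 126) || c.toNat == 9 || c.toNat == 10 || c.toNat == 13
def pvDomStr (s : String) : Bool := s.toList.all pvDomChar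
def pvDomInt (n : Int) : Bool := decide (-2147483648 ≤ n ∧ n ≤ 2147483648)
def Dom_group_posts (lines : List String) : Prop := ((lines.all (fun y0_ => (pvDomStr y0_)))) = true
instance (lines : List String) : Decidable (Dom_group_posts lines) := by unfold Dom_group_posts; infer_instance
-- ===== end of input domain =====

-- B groups lines into posts by slicing between precomputed '### ' marker positions instead of A's
-- flush-on-marker accumulator loop; return values proved equal (both Pythons append the same
-- '### ' sentinel to the caller's list in place, so the observable mutation is identical too).

-- ===== PORT A =====
def group_posts (lines : List String) : List (List String) :=
  let lines := lines ++ ["### "]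
  (lines.foldl
    (fun (st : List (List String) × List String) line =>
      if PySem.Str.startswith line "### " then (st.1 ++ [st.2], [line])
      else (st.1, st.2 ++ [line]))
    ([], [])).1

-- ===== PORT B =====
def group_posts_alt (lines : List String) : List (List String) :=
  let lines := lines ++ ["### "]
  let idx : List Int :=
    ((PySem.List.enumerate lines).filter (fun p => PySem.Str.startswith p.2 "### ")).map (fun p => p.1)
  let bounds : List Int := 0 :: idx
  (List.range idx.length).map
    (fun j => PySem.List.slice lines (some (bounds.getD j 0)) (some (bounds.getD (j + 1) 0)))

-- ===== PRECONDITION & SPEC =====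
def Spec_group_posts (lines : List String) (out : List (List String)) : Prop := out = group_posts_alt lines
instance (lines : List String) (out : List (List String)) : Decidable (Spec_group_posts lines out) := by unfold Spec_group_posts; infer_instance

-- ===== CLAIM (what is proved, stated in full; the proofs are below) =====
def Claim_equal_group_posts : Prop := ∀ (lines : List String), Dom_group_posts lines → Spec_group_posts lines (group_posts lines)

-- ===== LEMMAS AND PROOFS =====

-- the marker test both programs use
def pvMarker (s : String) : Bool := PySem.Str.startswith s "### "

-- marker positions in a list of lines
def pvIdx : List String → List Nat
  | [] => []
  | x :: xs => (if pvMarker x then [0] else []) ++ (pvIdx xs).map (· + 1)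

-- B's posts: slices between consecutive boundary positions, on the Nat side
def pvChain (L : List String) (js : List Nat) : List (List String) :=
  (js.zip js.tail).map (fun p => (L.drop p.1).take (p.2 - p.1))

-- A's loop body, named for the proofs
def pvStep (st : List (List String) × List String) (line : String) : List (List String) × List String :=
  if pvMarker line then (st.1 ++ [st.2], [line]) else (st.1, st.2 ++ [line])

-- recursive characterisation of A's loop: finished posts produced with current buffer `cur`
def pvGrp (cur : List String) : List String → List (List String)
  | [] => []
  | x :: xs => if pvMarker x then cur :: pvGrp [x] xs else pvGrp (cur ++ [x]) xs

-- B's marker-index comprehension computes pvIdx (shifted by the enumerate start)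
theorem pvEnum (xs : List String) (s : Int) :
    ((PySem.List.enumerate xs s).filter (fun p => pvMarker p.2)).map (fun p => p.1)
      = (pvIdx xs).map (fun (n : Nat) => s + (n : Int)) := by
  induction xs generalizing s with
  | nil => simp [PySem.List.enumerate_nil, pvIdx]
  | cons x xs ih =>
      rw [PySem.List.enumerate_cons, pvIdx]
      by_cases h : pvMarker x = true
      · rw [List.filter_cons_of_pos (by simpa using h), if_pos h]
        rw [List.map_cons, List.singleton_append, List.map_cons, ih, List.map_map]
        refine congrArg₂ _ (by simp) (List.map_congr_left ?_)
        intro n _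
        simp only [Function.comp_apply]
        push_cast; ring
      · rw [List.filter_cons_of_neg (by simpa using h), if_neg h]
        rw [ih, List.nil_append, List.map_map]
        refine List.map_congr_left ?_
        intro n _
        simp only [Function.comp_apply]
        push_cast; ring

-- the 'for j in range(len(idx))' comprehension over bounds[j], bounds[j+1] as a zip of consecutive pairs
theorem pvRangePairs (f : Int → Int → List String) (b0 : Int) (rest : List Int) (d : Int) :
    (List.range rest.length).map
        (fun j => f ((b0 :: rest).getD j d) ((b0 :: rest).getD (j + 1) d))
      = ((b0 :: rest).zip rest).map (fun p => f p.1 p.2) := by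
  induction rest generalizing b0 with
  | nil => simp
  | cons b t ih =>
      rw [List.length_cons, List.range_succ_eq_map]
      simp only [List.map_cons, List.map_map, List.zip_cons_cons]
      refine congrArg₂ _ rfl ?_
      simpa [Function.comp] using ih b

-- the Int-valued slice chain B computes is pvChain on the Nat positions
theorem pvCast (L : List String) (js : List Nat) :
    (((js.map (fun (n : Nat) => (n : Int))).zip ((js.map (fun (n : Nat) => (n : Int))).tail)).map
        (fun p => PySem.List.slice L (some p.1) (some p.2)))
      = pvChain L js := by
  induction js with
  | nil => simp [pvChain]
  | cons a t ih =>
      cases t with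
      | nil => simp [pvChain]
      | cons b t' =>
          simp only [List.map_cons, List.tail_cons, List.zip_cons_cons, pvChain] at ih ⊢
          rw [PySem.List.slice_natCast]
          exact congrArg₂ _ rfl ih

-- dropping one head line shifts every boundary by one
theorem pvChainShift (L : List String) (x : String) (js : List Nat) :
    pvChain (x :: L) (js.map (· + 1)) = pvChain L js := by
  unfold pvChain
  induction js with
  | nil => simp
  | cons a t ih =>
      cases t with
      | nil => simp
      | cons b t' =>
          simp only [List.map_cons, List.tail_cons, List.zip_cons_cons] at ih ⊢
          refine congrArg₂ _ ?_ ih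
          simp [Nat.add_sub_add_right]

-- A's fold in terms of pvGrp
theorem pvA_fold (L : List String) (acc : List (List String)) (cur : List String) :
    (L.foldl pvStep (acc, cur)).1 = acc ++ pvGrp cur L := by
  induction L generalizing acc cur with
  | nil => simp [pvGrp]
  | cons x xs ih =>
      simp only [List.foldl_cons, pvStep, pvGrp]
      by_cases h : pvMarker x = true
      · simp [h, ih]
      · simp [h, ih]

-- A's accumulator recursion computes exactly B's boundary slices
theorem pvMain (L : List String) (cur : List String) :
    pvGrp cur L
      = match pvIdx L with
        | [] => []
        | i :: is => (cur ++ L.take i) :: pvChain L (i :: is) := by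
  induction L generalizing cur with
  | nil => simp [pvGrp, pvIdx]
  | cons x xs ih =>
      by_cases h : pvMarker x = true
      · rw [pvGrp, if_pos h]
        show _ = (match pvIdx (x :: xs) with
          | [] => []
          | i :: is => (cur ++ (x :: xs).take i) :: pvChain (x :: xs) (i :: is))
        rw [pvIdx, if_pos h, List.singleton_append]
        refine congrArg₂ _ (by simp) ?_
        rw [ih [x]]
        cases hx : pvIdx xs with
        | nil => simp [pvChain]
        | cons i is =>
            simp only [List.map_cons]
            unfold pvChain
            simp only [List.map_cons, List.tail_cons, List.zip_cons_cons]
            refine congrArg₂ _ (by simp) ?_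
            have := pvChainShift xs x (i :: is)
            unfold pvChain at this
            simpa using this.symm
      · rw [pvGrp, if_neg h]
        show _ = (match pvIdx (x :: xs) with
          | [] => []
          | i :: is => (cur ++ (x :: xs).take i) :: pvChain (x :: xs) (i :: is))
        rw [pvIdx, if_neg h, List.nil_append, ih (cur ++ [x])]
        cases hx : pvIdx xs with
        | nil => simp
        | cons i is =>
            simp only [List.map_cons]
            refine congrArg₂ _ (by simp) ?_
            exact (pvChainShift xs x (i :: is)).symm

-- ===== VERDICT (by name: the statement is the Claim_ definition above) =====
theorem group_posts_spec : Claim_equal_group_posts := by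
  intro lines _
  unfold Spec_group_posts group_posts group_posts_alt
  simp only []
  set L := lines ++ ["### "] with hL
  have hA : (L.foldl
      (fun (st : List (List String) × List String) line =>
        if PySem.Str.startswith line "### " then (st.1 ++ [st.2], [line])
        else (st.1, st.2 ++ [line])) ([], [])).1 = pvGrp [] L := by
    simpa [pvStep, pvMarker] using pvA_fold L [] []
  rw [hA, pvMain]
  have hidx : ((PySem.List.enumerate L 0).filter (fun p => PySem.Str.startswith p.2 "### ")).map
      (fun p => p.1) = (pvIdx L).map (fun (n : Nat) => (n : Int)) := by
    simpa [pvMarker] using pvEnum L 0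
  rw [hidx]
  rw [pvRangePairs (fun a b => PySem.List.slice L (some a) (some b)) 0
      ((pvIdx L).map (fun (n : Nat) => (n : Int))) 0]
  have h0 : (0 : Int) :: (pvIdx L).map (fun (n : Nat) => (n : Int))
      = ((0 :: pvIdx L).map (fun (n : Nat) => (n : Int))) := by simp
  rw [h0]
  have hc : ((0 :: pvIdx L).map (fun (n : Nat) => (n : Int))).tail
      = (pvIdx L).map (fun (n : Nat) => (n : Int)) := by simp
  rw [← hc, pvCast L (0 :: pvIdx L)]
  cases hx : pvIdx L with
  | nil => simp [pvChain]
  | cons i is =>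
      unfold pvChain
      simp only [List.zip_cons_cons, List.tail_cons, List.map_cons]
      refine congrArg₂ _ (by simp) rfl
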